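-- pv_equiv track=rewrite | github.com/bngo13/COMP-293K | game.py | solve_game
-- ===== SOURCE A (Python) =====
-- def solve_game(util_map):
--     dWorkUtils = {}
--     # Solve Attacker First
--     for dstrat, utils in util_map.items():
--         aBestStrat = [None, None]
--         for astrat, util in enumerate(utils):
--             if None in aBestStrat:
--                 aBestStrat[0] = astrat
--                 aBestStrat[1] = util
--
--             if util[1] > aBestStrat[1][1]:
--                 aBestStrat[0] = astrat
--                 aBestStrat[1] = util
--         dWorkUtils[dstrat] = aBestStrat
--
--     # Solve Defender Next
--     bestStrat = None
--     bestUtils = None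
--     for dstrat, [astrat, utils] in dWorkUtils.items():
--         if None in [bestStrat, bestUtils]:
--             bestStrat = (dstrat, astrat)
--             bestUtils = utils
--
--         if utils[0] > bestUtils[0]:
--             bestStrat = (dstrat, astrat)
--             bestUtils = utils
--
--     return (bestStrat, bestUtils)
-- ===== SOURCE B (Python) =====
-- def solve_game(util_map):
--     cands = []
--     for dstrat, utils in util_map.items():
--         astrat, util = sorted(enumerate(utils), key=lambda q: q[1][1], reverse=True)[0]
--         cands.append(((dstrat, astrat), util))
--     return sorted(cands, key=lambda c: c[1][0], reverse=True)[0]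
-- ===== Notes on version B (the rewrite author's own statement) =====
-- stated objective: alternative
-- what changed: B replaces both of A's running-max scans by sort-then-take-head: for each defender strategy it stably reverse-sorts enumerate(utils) by attacker utility and takes the first element, then stably reverse-sorts the candidate list by defender utility and takes the first; sort stability reproduces A's first-seen-wins strict '>' tie-breaking. Trades A's linear scans for O(n log n) sorts.
-- outside the precondition, e.g. on solve_game({}): A returns (None, None), B raises IndexError
import Mathlib
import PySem

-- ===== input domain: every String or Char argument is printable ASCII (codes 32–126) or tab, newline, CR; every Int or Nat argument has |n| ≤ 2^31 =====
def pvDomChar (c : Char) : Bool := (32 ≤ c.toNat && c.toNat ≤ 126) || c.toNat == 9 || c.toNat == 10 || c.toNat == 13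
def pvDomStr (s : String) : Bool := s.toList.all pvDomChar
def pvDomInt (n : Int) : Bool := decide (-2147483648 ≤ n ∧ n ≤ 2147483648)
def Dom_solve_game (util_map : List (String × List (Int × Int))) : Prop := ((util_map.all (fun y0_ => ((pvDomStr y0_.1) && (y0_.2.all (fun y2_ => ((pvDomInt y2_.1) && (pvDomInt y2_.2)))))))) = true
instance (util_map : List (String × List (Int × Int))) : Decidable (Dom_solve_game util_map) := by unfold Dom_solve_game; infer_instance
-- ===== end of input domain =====

-- B replaces A's two running-max scans by stable reverse sorts with take-head (objective: alternative).

-- ===== PORT A =====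
-- inner-loop body: the attacker-best update for one enumerated utility pair
def solve_game_stepA (aBestStrat : Option Int × Option (Int × Int)) (p : Int × (Int × Int)) :
    Option Int × Option (Int × Int) :=
  let b1 := if aBestStrat.1.isNone || aBestStrat.2.isNone then (some p.1, some p.2) else aBestStrat
  match b1.2 with
  | some u => if p.2.2 > u.2 then (some p.1, some p.2) else b1
  | none => b1   -- unreachable in Python once the loop runs (b1.2 is set on the first iteration)

-- attacker loop for one defender strategy ([None, None] sentinel state)
def solve_game_aInner (utils : List (Int × Int)) : Option Int × Option (Int × Int) :=
  (PySem.List.enumerate utils).foldl solve_game_stepA (none, none)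

-- defender-loop body
def solve_game_stepD (best : Option (String × Option Int) × Option (Int × Int))
    (p : String × (Option Int × Option (Int × Int))) :
    Option (String × Option Int) × Option (Int × Int) :=
  let b1 := if best.1.isNone || best.2.isNone then (some (p.1, p.2.1), p.2.2) else best
  match p.2.2, b1.2 with
  | some u, some bu => if u.1 > bu.1 then (some (p.1, p.2.1), some u) else b1
  | _, _ => b1   -- here Python raises TypeError (utils is None); excluded by Pre_

def solve_game (util_map : List (String × List (Int × Int))) : (String × Int) × (Int × Int) :=
  let dWorkUtils : PySem.Dict String (Option Int × Option (Int × Int)) :=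
    util_map.foldl (fun d p => d.insert p.1 (solve_game_aInner p.2)) PySem.Dict.empty
  let fin := dWorkUtils.items.foldl solve_game_stepD (none, none)
  match fin with
  | (some (d, some a), some u) => ((d, a), u)
  | _ => (("", 0), (0, 0))   -- here Python returns (None, None)/partly-None (empty map); excluded by Pre_

-- ===== PORT B =====
-- sorted(enumerate(utils), key=lambda q: q[1][1], reverse=True)[0]  (none = IndexError, excluded by Pre_)
def solve_game_alt_best (utils : List (Int × Int)) : Option (Int × (Int × Int)) :=
  (PySem.List.sorted (PySem.List.enumerate utils) (fun q => q.2.2) true).head?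

def solve_game_alt (util_map : List (String × List (Int × Int))) : (String × Int) × (Int × Int) :=
  let cands := util_map.foldl (fun acc p =>
      match solve_game_alt_best p.2 with
      | some (astrat, util) => acc ++ [((p.1, astrat), util)]
      | none => acc          -- here Python raises IndexError (empty utils); excluded by Pre_
    ) []
  match (PySem.List.sorted cands (fun c => c.2.1) true).head? with
  | some r => r
  | none => (("", 0), (0, 0))   -- here Python raises IndexError (empty map); excluded by Pre_

-- ===== PRECONDITION & SPEC =====
-- Pre_ excludes the empty map (A returns (None, None), not a value of the declared pair type; B raises
-- IndexError), maps containing an empty utils list (A raises TypeError, B raises IndexError), and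
-- duplicate defender keys, which cannot occur in A's actual dict argument.
def Pre_solve_game (util_map : List (String × List (Int × Int))) : Prop :=
  util_map ≠ [] ∧ (util_map.map Prod.fst).Nodup ∧ ∀ p ∈ util_map, p.2 ≠ []
instance (util_map : List (String × List (Int × Int))) : Decidable (Pre_solve_game util_map) := by
  unfold Pre_solve_game; infer_instance

def pvWitness_solve_game : (List (String × List (Int × Int))) := [("a", [(1, 2)])]

def Spec_solve_game (util_map : List (String × List (Int × Int))) (out : (String × Int) × (Int × Int)) : Prop := out = solve_game_alt util_map
instance (util_map : List (String × List (Int × Int))) (out : (String × Int) × (Int × Int)) : Decidable (Spec_solve_game util_map out) := by unfold Spec_solve_game; infer_instance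

-- ===== CLAIM (what is proved, stated in full; the proofs are below) =====
def Claim_equal_solve_game : Prop := ∀ (util_map : List (String × List (Int × Int))), Dom_solve_game util_map → Pre_solve_game util_map → Spec_solve_game util_map (solve_game util_map)

-- ===== LEMMAS AND PROOFS =====

-- running "first element with strictly larger key wins" fold
def pvRun {α : Type} (key : α → Int) (m x : α) : α := if key m < key x then x else m

-- head of a stable reverse insertion sort fold = the running first-max
lemma pvHeadInsertFold {α : Type} (key : α → Int) :
    ∀ (l : List α) (m : α) (t : List α),
      (l.foldl (fun acc x => PySem.List.insertBy (fun a b => decide (key b < key a)) x acc) (m :: t)).head?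
        = some (l.foldl (pvRun key) m) := by
  intro l
  induction l with
  | nil => intro m t; rfl
  | cons x l ih =>
    intro m t
    simp only [List.foldl_cons]
    by_cases h : key m < key x
    · have : PySem.List.insertBy (fun a b => decide (key b < key a)) x (m :: t) = x :: m :: t := by
        simp [PySem.List.insertBy, h]
      rw [this, ih]
      simp [pvRun, h]
    · have : PySem.List.insertBy (fun a b => decide (key b < key a)) x (m :: t)
          = m :: PySem.List.insertBy (fun a b => decide (key b < key a)) x t := by
        simp [PySem.List.insertBy, h]
      rw [this, ih]
      simp [pvRun, h]

-- head of sorted(xs, key, reverse=True) on a nonempty list = the running first-max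
lemma pvHeadSorted {α : Type} (key : α → Int) (x : α) (l : List α) :
    (PySem.List.sorted (x :: l) key true).head? = some (l.foldl (pvRun key) x) := by
  rw [PySem.List.sorted_rev_eq_foldl_insertBy]
  simp only [List.foldl_cons]
  have h0 : PySem.List.insertBy (fun a b => decide (key b < key a)) x ([] : List α) = [x] := by
    simp [PySem.List.insertBy]
  rw [h0]
  exact pvHeadInsertFold key l x []

-- A's inner loop, once initialised, is the same running first-max
lemma pvAFold : ∀ (l : List (Int × (Int × Int))) (m : Int × (Int × Int)),
    l.foldl solve_game_stepA (some m.1, some m.2)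
      = (some (l.foldl (pvRun (fun q => q.2.2)) m).1, some (l.foldl (pvRun (fun q => q.2.2)) m).2) := by
  intro l
  induction l with
  | nil => intro m; rfl
  | cons x l ih =>
    intro m
    simp only [List.foldl_cons]
    have hstep : solve_game_stepA (some m.1, some m.2) x
        = (some (pvRun (fun q => q.2.2) m x).1, some (pvRun (fun q => q.2.2) m x).2) := by
      by_cases h : m.2.2 < x.2.2 <;> simp [solve_game_stepA, pvRun, gt_iff_lt, h]
    rw [hstep, ih]

-- for nonempty utils both inner computations return the same enumerated pair
lemma pvInner (u0 : Int × Int) (rest : List (Int × Int)) :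
    ∃ m : Int × (Int × Int),
      solve_game_alt_best (u0 :: rest) = some m ∧
      solve_game_aInner (u0 :: rest) = (some m.1, some m.2) := by
  refine ⟨(PySem.List.enumerate rest 1).foldl (pvRun (fun q => q.2.2)) (0, u0), ?_, ?_⟩
  · unfold solve_game_alt_best
    rw [PySem.List.enumerate_cons]
    exact pvHeadSorted _ _ _
  · unfold solve_game_aInner
    rw [PySem.List.enumerate_cons, List.foldl_cons]
    have h0 : solve_game_stepA (none, none) ((0 : Int), u0) = (some (0 : Int), some u0) := by
      simp [solve_game_stepA]
    rw [h0]
    exact pvAFold _ ((0 : Int), u0)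

-- the per-defender candidate (total; agrees with both ports on nonempty utils)
def pvCand (p : String × List (Int × Int)) : (String × Int) × (Int × Int) :=
  match solve_game_alt_best p.2 with
  | some (a, u) => ((p.1, a), u)
  | none => (("", 0), (0, 0))

-- A-state wrapper for a fully-determined best
def pvWrap (r : (String × Int) × (Int × Int)) : Option (String × Option Int) × Option (Int × Int) :=
  (some (r.1.1, some r.1.2), some r.2)

lemma pvCandSome (p : String × List (Int × Int)) (h : p.2 ≠ []) :
    solve_game_alt_best p.2 = some ((pvCand p).1.2, (pvCand p).2) ∧
    solve_game_aInner p.2 = (some (pvCand p).1.2, some (pvCand p).2) ∧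
    (pvCand p).1.1 = p.1 := by
  obtain ⟨u0, rest, hu⟩ : ∃ u0 rest, p.2 = u0 :: rest := by
    cases hp : p.2 with
    | nil => exact absurd hp h
    | cons a b => exact ⟨a, b, rfl⟩
  obtain ⟨m, hb, ha⟩ := pvInner u0 rest
  have hb' : solve_game_alt_best p.2 = some m := by rw [hu]; exact hb
  have ha' : solve_game_aInner p.2 = (some m.1, some m.2) := by rw [hu]; exact ha
  have hc : pvCand p = ((p.1, m.1), m.2) := by simp [pvCand, hb']
  refine ⟨?_, ?_, ?_⟩ <;> simp [hb', ha', hc]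

-- B's candidate list is the map of pvCand
lemma pvCands (l : List (String × List (Int × Int))) (h : ∀ p ∈ l, p.2 ≠ []) :
    ∀ acc : List ((String × Int) × (Int × Int)),
      l.foldl (fun acc p =>
          match solve_game_alt_best p.2 with
          | some (astrat, util) => acc ++ [((p.1, astrat), util)]
          | none => acc) acc
        = acc ++ l.map pvCand := by
  induction l with
  | nil => intro acc; simp
  | cons p t ih =>
    intro acc
    obtain ⟨hp, -, hfst⟩ := pvCandSome p (h p List.mem_cons_self)
    have he : ((p.1, (pvCand p).1.2), (pvCand p).2) = pvCand p := by
      rw [← hfst]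
    simp only [List.foldl_cons, hp, List.map_cons, he]
    rw [ih (fun q hq => h q (List.mem_cons_of_mem _ hq))]
    simp

-- A's defender loop over the mapped items is the running first-max over the candidates
lemma pvOuter : ∀ (l : List (String × List (Int × Int))), (∀ p ∈ l, p.2 ≠ []) →
    ∀ r : (String × Int) × (Int × Int),
      (l.map (fun p => (p.1, solve_game_aInner p.2))).foldl solve_game_stepD (pvWrap r)
        = pvWrap ((l.map pvCand).foldl (pvRun (fun c => c.2.1)) r) := by
  intro l
  induction l with
  | nil => intro _ r; rfl
  | cons p t ih =>
    intro h r
    obtain ⟨_, hp, hfst⟩ := pvCandSome p (h p List.mem_cons_self)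
    simp only [List.map_cons, List.foldl_cons, hp]
    have hstep : solve_game_stepD (pvWrap r) (p.1, (some (pvCand p).1.2, some (pvCand p).2))
        = pvWrap (pvRun (fun c => c.2.1) r (pvCand p)) := by
      by_cases hc : r.2.1 < (pvCand p).2.1 <;>
        simp [solve_game_stepD, pvWrap, pvRun, gt_iff_lt, hc, hfst]
    rw [hstep]
    exact ih (fun q hq => h q (List.mem_cons_of_mem _ hq)) _

theorem pv_main : ∀ (util_map : List (String × List (Int × Int))),
    Pre_solve_game util_map → solve_game util_map = solve_game_alt util_map := by
  rintro um ⟨hne, hnd, hall⟩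
  cases um with
  | nil => exact absurd rfl hne
  | cons p0 rest =>
    unfold solve_game solve_game_alt
    have hitems : (List.foldl (fun d p => d.insert p.1 (solve_game_aInner p.2))
        PySem.Dict.empty (p0 :: rest)).items
        = (p0 :: rest).map (fun p => (p.1, solve_game_aInner p.2)) := by
      have := PySem.Dict.items_foldl_insert_fresh (l := p0 :: rest) (k := Prod.fst)
        (v := fun p => solve_game_aInner p.2) (d := PySem.Dict.empty)
        (fun a _ => by simp) hnd
      simpa using this
    have htail : ∀ q ∈ rest, q.2 ≠ [] := fun q hq => hall q (List.mem_cons_of_mem _ hq)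
    obtain ⟨_, hp0, hfst⟩ := pvCandSome p0 (hall p0 List.mem_cons_self)
    -- B side: the candidate list and its sorted head
    rw [pvCands (p0 :: rest) hall []]
    simp only [List.map_cons, List.nil_append]
    rw [pvHeadSorted (fun c => c.2.1) (pvCand p0) (rest.map pvCand)]
    -- A side
    simp only [hitems]
    simp only [List.map_cons, List.foldl_cons, hp0]
    have hinit : solve_game_stepD ((none, none) : Option (String × Option Int) × Option (Int × Int))
        (p0.1, (some (pvCand p0).1.2, some (pvCand p0).2)) = pvWrap (pvCand p0) := by
      simp [solve_game_stepD, pvWrap, hfst]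
    rw [hinit, pvOuter rest htail (pvCand p0)]
    simp [pvWrap]

-- ===== VERDICT (by name: the statement is the Claim_ definition above) =====
theorem solve_game_spec : Claim_equal_solve_game := by
  intro um _ hpre
  unfold Spec_solve_game
  exact pv_main um hpre
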